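-- pv_equiv track=rewrite | github.com/girving/aks | scripts/rvw/find_certificate3.py | monomial_index
-- ===== SOURCE A (Python) =====
-- def monomial_index(i, j, max_deg=4):
--     """Index for s^i * t^j monomial."""
--     idx = 0
--     for d in range(max_deg+1):
--         for jj in range(d+1):
--             ii = d - jj
--             if ii == i and jj == j:
--                 return idx
--             idx += 1
--     return -1
-- ===== SOURCE B (Python) =====
-- def monomial_index(i, j, max_deg=4):
--     """Index for s^i * t^j monomial (closed form)."""
--     if i >= 0 and j >= 0 and i + j <= max_deg:
--         d = i + j
--         return d * (d + 1) // 2 + j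
--     return -1
-- ===== Notes on version B (the rewrite author's own statement) =====
-- stated objective: faster
-- what changed: Replaced the quadratic double loop over all monomials with the closed-form triangular-number index (i+j)(i+j+1)//2 + j plus range guards.
import Mathlib
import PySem

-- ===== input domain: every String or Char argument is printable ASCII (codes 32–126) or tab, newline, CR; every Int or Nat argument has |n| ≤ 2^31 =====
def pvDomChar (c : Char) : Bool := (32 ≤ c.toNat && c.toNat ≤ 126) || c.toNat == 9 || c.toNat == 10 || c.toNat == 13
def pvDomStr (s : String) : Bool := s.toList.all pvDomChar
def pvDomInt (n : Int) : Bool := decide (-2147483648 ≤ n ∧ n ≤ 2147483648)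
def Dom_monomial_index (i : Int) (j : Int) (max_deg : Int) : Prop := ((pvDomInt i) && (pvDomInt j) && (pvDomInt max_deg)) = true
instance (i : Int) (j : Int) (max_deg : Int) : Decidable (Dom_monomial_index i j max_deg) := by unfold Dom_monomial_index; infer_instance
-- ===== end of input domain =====

-- B replaces A's double loop over all monomials by the closed-form index (i+j)(i+j+1)//2 + j (faster).

-- ===== PORT A =====
-- inner 'for jj in range(d+1)' loop: returns (some idx) on the early return, else (none, final idx)
def pvAInner (i j d : Int) : List Int → Int → Option Int × Int
  | [], idx => (none, idx)
  | jj :: rest, idx =>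
      if d - jj = i ∧ jj = j then (some idx, idx)
      else pvAInner i j d rest (idx + 1)

-- outer 'for d in range(max_deg+1)' loop
def pvAOuter (i j : Int) : List Int → Int → Int
  | [], _ => -1
  | d :: rest, idx =>
      match pvAInner i j d (PySem.List.pyRange 0 (d + 1) 1) idx with
      | (some r, _) => r
      | (none, idx') => pvAOuter i j rest idx'

def monomial_index (i : Int) (j : Int) (max_deg : Int) : Int :=
  pvAOuter i j (PySem.List.pyRange 0 (max_deg + 1) 1) 0

-- ===== PORT B =====
def monomial_index_alt (i : Int) (j : Int) (max_deg : Int) : Int :=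
  if 0 ≤ i ∧ 0 ≤ j ∧ i + j ≤ max_deg then
    PySem.Int.floordiv ((i + j) * (i + j + 1)) 2 + j
  else -1

-- ===== PRECONDITION & SPEC =====
def Spec_monomial_index (i : Int) (j : Int) (max_deg : Int) (out : Int) : Prop := out = monomial_index_alt i j max_deg
instance (i : Int) (j : Int) (max_deg : Int) (out : Int) : Decidable (Spec_monomial_index i j max_deg out) := by unfold Spec_monomial_index; infer_instance

-- ===== CLAIM (what is proved, stated in full; the proofs are below) =====
def Claim_equal_monomial_index : Prop := ∀ (i : Int) (j : Int) (max_deg : Int), Dom_monomial_index i j max_deg → Spec_monomial_index i j max_deg (monomial_index i j max_deg)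

-- ===== LEMMAS AND PROOFS =====

-- triangular number, as the port computes it
def pvS (d : Int) : Int := PySem.Int.floordiv (d * (d + 1)) 2

lemma pvS_two_mul (d : Int) : 2 * pvS d = d * (d + 1) := by
  have hdvd : (2 : Int) ∣ d * (d + 1) := (Int.even_mul_succ_self d).two_dvd
  have := Int.ediv_mul_cancel hdvd
  unfold pvS
  rw [PySem.Int.floordiv_eq_ediv_of_pos (by norm_num)]
  omega

lemma pvS_succ (a : Int) : pvS a + (a + 1) = pvS (a + 1) := by
  have h1 := pvS_two_mul a
  have h2 := pvS_two_mul (a + 1)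
  have : (a + 1) * (a + 1 + 1) = a * (a + 1) + 2 * (a + 1) := by ring
  omega

lemma pvAInner_eq (i j d : Int) :
    ∀ (n : Nat) (a idx : Int), a + n = d + 1 →
      pvAInner i j d (PySem.List.pyRange a (d + 1) 1) idx =
        if a ≤ j ∧ j ≤ d ∧ i = d - j then (some (idx + (j - a)), idx + (j - a))
        else (none, idx + (d + 1 - a)) := by
  intro n
  induction n with
  | zero =>
      intro a idx ha
      rw [PySem.List.pyRange_one_eq_nil (by omega)]
      have hcond : ¬ (a ≤ j ∧ j ≤ d ∧ i = d - j) := by omega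
      simp [pvAInner, hcond]
      omega
  | succ m ih =>
      intro a idx ha
      rw [PySem.List.pyRange_one_cons (by omega)]
      simp only [pvAInner]
      by_cases hmatch : d - a = i ∧ a = j
      · have hcond : a ≤ j ∧ j ≤ d ∧ i = d - j := by omega
        simp [hmatch, hcond]
      · rw [if_neg hmatch, ih (a + 1) (idx + 1) (by omega)]
        by_cases hc : a ≤ j ∧ j ≤ d ∧ i = d - j
        · have hj : a + 1 ≤ j := by
            rcases hc with ⟨h1, h2, h3⟩
            by_contra h
            exact hmatch ⟨by omega, by omega⟩
          have hc' : a + 1 ≤ j ∧ j ≤ d ∧ i = d - j := ⟨hj, hc.2⟩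
          rw [if_pos hc', if_pos hc]
          have : idx + 1 + (j - (a + 1)) = idx + (j - a) := by omega
          rw [this]
        · have hc' : ¬ (a + 1 ≤ j ∧ j ≤ d ∧ i = d - j) := by
            intro h; exact hc ⟨by omega, h.2⟩
          rw [if_neg hc', if_neg hc]
          have : idx + 1 + (d + 1 - (a + 1)) = idx + (d + 1 - a) := by omega
          rw [this]

lemma pvAOuter_eq (i j max_deg : Int) :
    ∀ (n : Nat) (a : Int), 0 ≤ a → a + n = max_deg + 1 →
      pvAOuter i j (PySem.List.pyRange a (max_deg + 1) 1) (pvS a) =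
        if a ≤ i + j ∧ 0 ≤ i ∧ 0 ≤ j ∧ i + j ≤ max_deg then pvS (i + j) + j
        else -1 := by
  intro n
  induction n with
  | zero =>
      intro a ha hn
      rw [PySem.List.pyRange_one_eq_nil (by omega)]
      have hcond : ¬ (a ≤ i + j ∧ 0 ≤ i ∧ 0 ≤ j ∧ i + j ≤ max_deg) := by omega
      simp [pvAOuter, hcond]
  | succ m ih =>
      intro a ha hn
      rw [PySem.List.pyRange_one_cons (by omega)]
      simp only [pvAOuter]
      rw [pvAInner_eq i j a (a + 1).toNat 0 (pvS a) (by omega)]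
      by_cases hin : 0 ≤ j ∧ j ≤ a ∧ i = a - j
      · have hcond : a ≤ i + j ∧ 0 ≤ i ∧ 0 ≤ j ∧ i + j ≤ max_deg := by
          refine ⟨by omega, by omega, hin.1, by omega⟩
        have hij : i + j = a := by omega
        rw [if_pos hin, if_pos hcond, hij]
        simp
      · rw [if_neg hin]
        simp only []
        have hidx : pvS a + (a + 1 - 0) = pvS (a + 1) := by
          have := pvS_succ a; omega
        rw [hidx, ih (a + 1) (by omega) (by omega)]
        by_cases hc : a ≤ i + j ∧ 0 ≤ i ∧ 0 ≤ j ∧ i + j ≤ max_deg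
        · have hne : i + j ≠ a := by
            intro h
            exact hin ⟨hc.2.2.1, by omega, by omega⟩
          rw [if_pos (show a + 1 ≤ i + j ∧ 0 ≤ i ∧ 0 ≤ j ∧ i + j ≤ max_deg from ⟨by omega, hc.2⟩), if_pos hc]
        · rw [if_neg (by intro h; exact hc ⟨by omega, h.2⟩), if_neg hc]

-- ===== VERDICT (by name: the statement is the Claim_ definition above) =====
theorem monomial_index_spec : Claim_equal_monomial_index := by
  intro i j max_deg _
  unfold Spec_monomial_index monomial_index monomial_index_alt
  by_cases hm : max_deg + 1 ≤ 0
  · rw [PySem.List.pyRange_one_eq_nil hm]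
    have : ¬ (0 ≤ i ∧ 0 ≤ j ∧ i + j ≤ max_deg) := by omega
    simp [pvAOuter, this]
  · have h0 : pvS 0 = 0 := by decide
    have hmain := pvAOuter_eq i j max_deg (max_deg + 1).toNat 0 le_rfl (by omega)
    rw [h0] at hmain
    rw [hmain]
    by_cases hc : 0 ≤ i ∧ 0 ≤ j ∧ i + j ≤ max_deg
    · rw [if_pos (show (0:Int) ≤ i + j ∧ 0 ≤ i ∧ 0 ≤ j ∧ i + j ≤ max_deg from ⟨by omega, hc⟩), if_pos hc]
      rfl
    · rw [if_neg (by intro h; exact hc h.2), if_neg hc]
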